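-- pv_equiv track=rewrite | github.com/Genetical/ZoltBot | utils/timeframe.py | seconds
-- ===== SOURCE A (Python) =====
-- def seconds(s):
--     m, s = divmod(s, 60)
--     h, m = divmod(m, 60)
--     d, h = divmod(h, 24)
--
--     if all(i == 0 for i in [m,h,d]):
--         return f"{s} second{'s' if s != 1 else ''}"
--     elif all(i == 0 for i in [h,d]):
--         return f"{m} minute{'s' if m != 1 else ''} and {s} second{'s' if s != 1 else ''}"
--     elif d == 0:
--         return f"{h} hour{'s' if h != 1 else ''}, {m} minute{'s' if m != 1 else ''} and {s} second{'s' if s != 1 else ''}"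
--     else:
--         return f"{d} day{'s' if d != 1 else ''}, {h} hour{'s' if h != 1 else ''}, {m} minute{'s' if m != 1 else ''} and {s} second{'s' if s != 1 else ''}"
-- ===== SOURCE B (Python) =====
-- def _join_and(parts):
--     if len(parts) == 1:
--         return parts[0]
--     if len(parts) == 2:
--         return parts[0] + " and " + parts[1]
--     return parts[0] + ", " + _join_and(parts[1:])
--
-- def seconds(s):
--     m, s = divmod(s, 60)
--     h, m = divmod(m, 60)
--     d, h = divmod(h, 24)
--     units = [(d, "day"), (h, "hour"), (m, "minute"), (s, "second")]
--     start = 0 if d != 0 else (1 if h != 0 else (2 if m != 0 else 3))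
--     parts = [f"{v} {label}{'s' if v != 1 else ''}" for v, label in units[start:]]
--     return _join_and(parts)
-- ===== Notes on version B (the rewrite author's own statement) =====
-- stated objective: simpler
-- what changed: Replaces A's four hand-written branch strings with a (value,label) table sliced at the first nonzero unit, uniform pluralized formatting of each pair, and a recursive ', '/' and ' joiner.
import Mathlib
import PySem

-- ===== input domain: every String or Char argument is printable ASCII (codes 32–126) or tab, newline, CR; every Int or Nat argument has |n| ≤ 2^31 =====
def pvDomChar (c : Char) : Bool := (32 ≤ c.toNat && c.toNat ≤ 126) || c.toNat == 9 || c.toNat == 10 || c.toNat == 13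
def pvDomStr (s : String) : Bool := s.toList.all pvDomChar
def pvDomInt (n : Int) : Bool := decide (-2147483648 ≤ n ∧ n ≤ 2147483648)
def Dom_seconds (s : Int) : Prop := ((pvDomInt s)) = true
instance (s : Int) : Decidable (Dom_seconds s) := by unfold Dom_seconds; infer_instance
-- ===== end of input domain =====

-- B differs from A by decomposition: a (value,label) table sliced at the first nonzero unit,
-- formatted uniformly and joined by a small recursive joiner, instead of A's four hand-written branches.

-- ===== PORT A =====
def seconds (s : Int) : String :=
  let m := PySem.Int.floordiv s 60
  let s := PySem.Int.mod s 60
  let h := PySem.Int.floordiv m 60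
  let m := PySem.Int.mod m 60
  let d := PySem.Int.floordiv h 24
  let h := PySem.Int.mod h 24
  if [m, h, d].all (fun i => i == 0) then
    PySem.Int.toStr s ++ " second" ++ (if s ≠ 1 then "s" else "")
  else if [h, d].all (fun i => i == 0) then
    PySem.Int.toStr m ++ " minute" ++ (if m ≠ 1 then "s" else "") ++ " and " ++
      PySem.Int.toStr s ++ " second" ++ (if s ≠ 1 then "s" else "")
  else if d == 0 then
    PySem.Int.toStr h ++ " hour" ++ (if h ≠ 1 then "s" else "") ++ ", " ++
      PySem.Int.toStr m ++ " minute" ++ (if m ≠ 1 then "s" else "") ++ " and " ++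
      PySem.Int.toStr s ++ " second" ++ (if s ≠ 1 then "s" else "")
  else
    PySem.Int.toStr d ++ " day" ++ (if d ≠ 1 then "s" else "") ++ ", " ++
      PySem.Int.toStr h ++ " hour" ++ (if h ≠ 1 then "s" else "") ++ ", " ++
      PySem.Int.toStr m ++ " minute" ++ (if m ≠ 1 then "s" else "") ++ " and " ++
      PySem.Int.toStr s ++ " second" ++ (if s ≠ 1 then "s" else "")

-- ===== PORT B =====
def joinAnd : List String → String
  | [] => ""
  | [p] => p
  | [p, q] => p ++ " and " ++ q
  | p :: rest => p ++ ", " ++ joinAnd rest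

def seconds_alt (s : Int) : String :=
  let m := PySem.Int.floordiv s 60
  let s := PySem.Int.mod s 60
  let h := PySem.Int.floordiv m 60
  let m := PySem.Int.mod m 60
  let d := PySem.Int.floordiv h 24
  let h := PySem.Int.mod h 24
  let units : List (Int × String) := [(d, "day"), (h, "hour"), (m, "minute"), (s, "second")]
  let start : Nat := if d ≠ 0 then 0 else if h ≠ 0 then 1 else if m ≠ 0 then 2 else 3
  let parts := (units.drop start).map
    (fun p => PySem.Int.toStr p.1 ++ " " ++ p.2 ++ (if p.1 ≠ 1 then "s" else ""))
  joinAnd parts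

-- ===== PRECONDITION & SPEC =====
def Spec_seconds (s : Int) (out : String) : Prop := out = seconds_alt s
instance (s : Int) (out : String) : Decidable (Spec_seconds s out) := by unfold Spec_seconds; infer_instance

-- ===== CLAIM (what is proved, stated in full; the proofs are below) =====
def Claim_equal_seconds : Prop := ∀ (s : Int), Dom_seconds s → Spec_seconds s (seconds s)

-- ===== LEMMAS AND PROOFS =====
theorem cat_day (x : String) : " " ++ ("day" ++ x) = " day" ++ x := by
  have h : (" " ++ "day" : String) = " day" := by decide
  rw [← String.append_assoc, h]
theorem cat_hour (x : String) : " " ++ ("hour" ++ x) = " hour" ++ x := by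
  have h : (" " ++ "hour" : String) = " hour" := by decide
  rw [← String.append_assoc, h]
theorem cat_minute (x : String) : " " ++ ("minute" ++ x) = " minute" ++ x := by
  have h : (" " ++ "minute" : String) = " minute" := by decide
  rw [← String.append_assoc, h]
theorem cat_second (x : String) : " " ++ ("second" ++ x) = " second" ++ x := by
  have h : (" " ++ "second" : String) = " second" := by decide
  rw [← String.append_assoc, h]

-- ===== VERDICT (by name: the statement is the Claim_ definition above) =====
theorem seconds_spec : Claim_equal_seconds := by
  intro s _
  unfold Spec_seconds seconds seconds_alt
  simp only [ne_eq]
  generalize PySem.Int.mod s 60 = S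
  generalize PySem.Int.mod (PySem.Int.floordiv s 60) 60 = M
  generalize PySem.Int.mod (PySem.Int.floordiv (PySem.Int.floordiv s 60) 60) 24 = H
  generalize PySem.Int.floordiv (PySem.Int.floordiv (PySem.Int.floordiv s 60) 60) 24 = D
  by_cases hD : D = 0 <;> by_cases hH : H = 0 <;> by_cases hM : M = 0 <;>
  simp [joinAnd, hD, hH, hM, String.append_assoc, cat_day, cat_hour, cat_minute, cat_second]
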